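-- pv_equiv track=rewrite | github.com/ElvisYong/IS110 | Week 9/Class/q5.py | get_strings_with_digits
-- ===== SOURCE A (Python) =====
-- def get_strings_with_digits(str_list, t):
--     count = 0
--     res = []
--     for i in str_list:
--         for j in i:
--             if j.isdigit():
--                 count += 1
--         res.append(i)
--         if count > t:
--             return res
-- ===== SOURCE B (Python) =====
-- def get_strings_with_digits(str_list, t):
--     # Phase 1: table of cumulative digit counts.
--     prefix = []
--     total = 0
--     for s in str_list:
--         total += sum(ch.isdigit() for ch in s)
--         prefix.append(total)
--     # Phase 2: binary search (prefix is nondecreasing) for the first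
--     # index whose cumulative count exceeds t.
--     lo, hi = 0, len(prefix)
--     while lo < hi:
--         mid = (lo + hi) // 2
--         if prefix[mid] > t:
--             hi = mid
--         else:
--             lo = mid + 1
--     if lo < len(str_list):
--         return str_list[:lo + 1]
--     return None
-- ===== Notes on version B (the rewrite author's own statement) =====
-- stated objective: alternative
-- what changed: Replaces A's fused scan (running counter, append-accumulator, early return) by building a table of cumulative digit counts and then binary-searching that nondecreasing table for the first entry exceeding t, returning a prefix slice.
import Mathlib
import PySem

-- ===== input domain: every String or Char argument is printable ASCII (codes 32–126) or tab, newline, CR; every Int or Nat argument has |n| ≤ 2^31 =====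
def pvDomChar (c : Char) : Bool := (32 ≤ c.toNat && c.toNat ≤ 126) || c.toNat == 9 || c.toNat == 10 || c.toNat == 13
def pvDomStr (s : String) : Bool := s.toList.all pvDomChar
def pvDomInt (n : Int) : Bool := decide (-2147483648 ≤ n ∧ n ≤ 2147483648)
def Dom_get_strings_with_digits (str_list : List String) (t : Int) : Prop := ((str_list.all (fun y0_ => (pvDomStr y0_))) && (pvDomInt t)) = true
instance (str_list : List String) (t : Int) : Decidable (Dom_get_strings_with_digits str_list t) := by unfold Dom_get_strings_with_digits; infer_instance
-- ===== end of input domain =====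

-- B replaces A's fused scan (running counter + append accumulator + early return) by a
-- cumulative-digit-count table plus a binary search for the cutoff; equal return value proved on all inputs.

-- ===== PORT A =====
def pvALoop (t : Int) : List String → Int → List String → Option (List String)
  | [], _, _ => none
  | i :: rest, count, res =>
    let count := i.toList.foldl (fun c j => if PySem.Chars.isdigit j then c + 1 else c) count
    let res := res ++ [i]
    if count > t then some res else pvALoop t rest count res

def get_strings_with_digits (str_list : List String) (t : Int) : Option (List String) :=
  pvALoop t str_list 0 []

-- ===== PORT B =====
def pvBCount (s : String) : Int :=
  (s.toList.map (fun c => if PySem.Chars.isdigit c then (1 : Int) else 0)).sum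

-- phase 1 loop: build the table of cumulative digit counts
def pvBTable : List String → Int → List Int → List Int
  | [], _, acc => acc
  | s :: rest, total, acc =>
    let total := total + pvBCount s
    pvBTable rest total (acc ++ [total])

-- phase 2 loop: binary search; pfx[mid] is in range since lo < hi ≤ pfx.length (getD is exact there)
def pvBSearch (pfx : List Int) (t : Int) (lo hi : Nat) : Nat :=
  if lo < hi then
    let mid := (lo + hi) / 2
    if pfx.getD mid 0 > t then pvBSearch pfx t lo mid
    else pvBSearch pfx t (mid + 1) hi
  else lo
termination_by hi - lo
decreasing_by all_goals omega

def get_strings_with_digits_alt (str_list : List String) (t : Int) : Option (List String) :=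
  let pfx := pvBTable str_list 0 []
  let lo := pvBSearch pfx t 0 pfx.length
  if lo < str_list.length then some (str_list.take (lo + 1)) else none

-- ===== PRECONDITION & SPEC =====
def Spec_get_strings_with_digits (str_list : List String) (t : Int) (out : Option (List String)) : Prop := out = get_strings_with_digits_alt str_list t
instance (str_list : List String) (t : Int) (out : Option (List String)) : Decidable (Spec_get_strings_with_digits str_list t out) := by unfold Spec_get_strings_with_digits; infer_instance

-- ===== CLAIM =====
def Claim_equal_get_strings_with_digits : Prop := ∀ (str_list : List String) (t : Int), Dom_get_strings_with_digits str_list t → Spec_get_strings_with_digits str_list t (get_strings_with_digits str_list t)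

-- ===== LEMMAS AND PROOFS =====

-- spec version of the cumulative table
def pvP : List String → Int → List Int
  | [], _ => []
  | s :: r, total => (total + pvBCount s) :: pvP r (total + pvBCount s)

-- linear first-index-above-t spec, used to characterise both ports
def pvFind (t : Int) : List Int → Option Nat
  | [] => none
  | x :: r => if x > t then some 0 else (pvFind t r).map (· + 1)

theorem pvfoldA (cs : List Char) (count : Int) :
    cs.foldl (fun c j => if PySem.Chars.isdigit j then c + 1 else c) count
      = count + (cs.map (fun c => if PySem.Chars.isdigit c then (1 : Int) else 0)).sum := by
  induction cs generalizing count with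
  | nil => simp
  | cons c cs ih => simp [List.foldl, ih]; split <;> ring

theorem pvBCount_nonneg (s : String) : 0 ≤ pvBCount s := by
  unfold pvBCount
  induction s.toList with
  | nil => simp
  | cons c cs ih => simp [List.map]; split <;> omega

theorem pvBTable_eq (l : List String) (total : Int) (acc : List Int) :
    pvBTable l total acc = acc ++ pvP l total := by
  induction l generalizing total acc with
  | nil => simp [pvBTable, pvP]
  | cons s r ih => simp [pvBTable, pvP, ih]

theorem pvP_length (l : List String) (total : Int) : (pvP l total).length = l.length := by
  induction l generalizing total with
  | nil => rfl
  | cons s r ih => simp [pvP, ih]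

theorem pvP_ge (l : List String) (total : Int) : ∀ x ∈ pvP l total, total ≤ x := by
  induction l generalizing total with
  | nil => simp [pvP]
  | cons s r ih =>
    intro x hx
    have hc := pvBCount_nonneg s
    simp [pvP] at hx
    rcases hx with h | h
    · omega
    · have := ih (total + pvBCount s) x h; omega

-- the table is nondecreasing in the getD view
theorem pvP_mono (l : List String) (total : Int) :
    ∀ i j, i ≤ j → j < l.length → (pvP l total).getD i 0 ≤ (pvP l total).getD j 0 := by
  induction l generalizing total with
  | nil => intro i j _ hj; simp at hj
  | cons s r ih =>
    intro i j hij hj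
    cases i with
    | zero =>
      cases j with
      | zero => exact le_refl _
      | succ j =>
        simp only [pvP, List.getD_cons_zero, List.getD_cons_succ]
        have hlen : j < r.length := by simpa using Nat.lt_of_succ_lt_succ hj
        have hmem : (pvP r (total + pvBCount s)).getD j 0 ∈ pvP r (total + pvBCount s) := by
          rw [List.getD_eq_getElem _ _ (by rw [pvP_length]; exact hlen)]
          exact List.getElem_mem _
        exact pvP_ge r (total + pvBCount s) _ hmem
    | succ i =>
      cases j with
      | zero => omega
      | succ j =>
        simp only [pvP, List.getD_cons_succ]
        exact ih (total + pvBCount s) i j (by omega) (by simpa using Nat.lt_of_succ_lt_succ hj)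

-- characterisation of A's loop via pvFind on the cumulative table
theorem pvA_char (t : Int) (l : List String) (count : Int) (res : List String) :
    pvALoop t l count res =
      (match pvFind t (pvP l count) with
       | some k => some (res ++ l.take (k + 1))
       | none => none) := by
  induction l generalizing count res with
  | nil => simp [pvALoop, pvP, pvFind]
  | cons i rest ih =>
    simp only [pvALoop, pvP, pvFind, pvfoldA]
    have hcnt : (i.toList.map fun c => if PySem.Chars.isdigit c then (1:Int) else 0).sum = pvBCount i := rfl
    rw [hcnt]
    by_cases h : count + pvBCount i > t
    · rw [if_pos h, if_pos h]
      simp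
    · rw [if_neg h, if_neg h, ih]
      cases pvFind t (pvP rest (count + pvBCount i)) with
      | none => simp
      | some k => simp [List.take_succ_cons]

-- pvFind facts in the getD view
theorem pvFind_some (t : Int) (pfx : List Int) (k : Nat) (h : pvFind t pfx = some k) :
    k < pfx.length ∧ pfx.getD k 0 > t ∧ ∀ i < k, ¬ pfx.getD i 0 > t := by
  induction pfx generalizing k with
  | nil => simp [pvFind] at h
  | cons x r ih =>
    simp only [pvFind] at h
    split at h
    · cases h
      refine ⟨by simp, by simpa, by omega⟩
    · cases hr : pvFind t r with
      | none => rw [hr] at h; simp at h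
      | some k' =>
        rw [hr] at h; simp at h; subst h
        obtain ⟨h1, h2, h3⟩ := ih k' hr
        refine ⟨by simp; omega, by simpa, ?_⟩
        intro i hi
        cases i with
        | zero => simpa using (by assumption : ¬ x > t)
        | succ i => simpa using h3 i (by omega)

theorem pvFind_none (t : Int) (pfx : List Int) (h : pvFind t pfx = none) :
    ∀ i < pfx.length, ¬ pfx.getD i 0 > t := by
  induction pfx with
  | nil => simp
  | cons x r ih =>
    simp only [pvFind] at h
    split at h
    · simp at h
    · intro i hi
      cases i with
      | zero => simpa using (by assumption : ¬ x > t)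
      | succ i =>
        simp only [List.getD_cons_succ]
        exact ih (by cases hr : pvFind t r <;> simp [hr] at h ⊢) i (by simpa using hi)

-- binary search invariant
theorem pvBSearch_inv (pfx : List Int) (t : Int)
    (mono : ∀ i j, i ≤ j → j < pfx.length → pfx.getD i 0 ≤ pfx.getD j 0) :
    ∀ lo hi, lo ≤ hi → hi ≤ pfx.length →
      (∀ i < lo, ¬ pfx.getD i 0 > t) → (∀ i, hi ≤ i → i < pfx.length → pfx.getD i 0 > t) →
      let r := pvBSearch pfx t lo hi
      lo ≤ r ∧ r ≤ hi ∧ (∀ i < r, ¬ pfx.getD i 0 > t) ∧ (∀ i, r ≤ i → i < pfx.length → pfx.getD i 0 > t) := by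
  intro lo hi
  induction hlt : hi - lo using Nat.strong_induction_on generalizing lo hi with
  | _ n ihn =>
  intro hle hhi hlow hhigh
  rw [pvBSearch]
  by_cases hc : lo < hi
  · rw [if_pos hc]
    set mid := (lo + hi) / 2 with hmid
    have hm1 : lo ≤ mid := by omega
    have hm2 : mid < hi := by omega
    by_cases hp : pfx.getD mid 0 > t
    · rw [if_pos hp]
      have := ihn (mid - lo) (by omega) lo mid rfl (by omega) (by omega) hlow
        (fun i hge hlt' => lt_of_lt_of_le hp (mono mid i hge hlt'))
      simp only at this
      exact ⟨this.1, by omega, this.2.2.1, this.2.2.2⟩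
    · rw [if_neg hp]
      have hlow' : ∀ i < mid + 1, ¬ pfx.getD i 0 > t := by
        intro i hi'
        by_cases h' : i < lo
        · exact hlow i h'
        · intro hgt
          exact hp (lt_of_lt_of_le hgt (mono i mid (by omega) (by omega)))
      have := ihn (hi - (mid + 1)) (by omega) (mid + 1) hi rfl (by omega) hhi hlow' hhigh
      simp only at this
      exact ⟨by omega, this.2.1, this.2.2.1, this.2.2.2⟩
  · rw [if_neg hc]
    have : lo = hi := by omega
    subst this
    exact ⟨le_refl _, le_refl _, hlow, hhigh⟩

-- B's search equals the linear first index
theorem pvB_char (l : List String) (t : Int) :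
    get_strings_with_digits_alt l t =
      (match pvFind t (pvP l 0) with
       | some k => some (l.take (k + 1))
       | none => none) := by
  unfold get_strings_with_digits_alt
  rw [pvBTable_eq]
  simp only [List.nil_append]
  have hlen := pvP_length l 0
  have hmono := pvP_mono l 0
  have hmono' : ∀ i j, i ≤ j → j < (pvP l 0).length → (pvP l 0).getD i 0 ≤ (pvP l 0).getD j 0 := by
    rw [hlen]; exact hmono
  cases hf : pvFind t (pvP l 0) with
  | some k =>
    obtain ⟨hk, hpk, hmin⟩ := pvFind_some t _ k hf
    have hinv := pvBSearch_inv (pvP l 0) t hmono' 0 (pvP l 0).length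
      (by omega) (le_refl _) (by omega) (by omega)
    simp only at hinv
    obtain ⟨_, hrle, hrlow, hrhigh⟩ := hinv
    set r := pvBSearch (pvP l 0) t 0 (pvP l 0).length with hr
    have hrk : r = k := by
      by_cases h1 : r < k
      · exact absurd (hrhigh r (le_refl _) (by omega)) (hmin r h1)
      · by_cases h2 : k < r
        · exact absurd hpk (hrlow k h2)
        · omega
    rw [hrk, if_pos (by omega : k < l.length)]
  | none =>
    have hnone := pvFind_none t _ hf
    have hinv := pvBSearch_inv (pvP l 0) t hmono' 0 (pvP l 0).length
      (by omega) (le_refl _) (by omega) (fun i h1 h2 => absurd h2 (by omega))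
    simp only at hinv
    obtain ⟨_, hrle, _, hrhigh⟩ := hinv
    set r := pvBSearch (pvP l 0) t 0 (pvP l 0).length with hr
    have : r = (pvP l 0).length := by
      by_cases h : r < (pvP l 0).length
      · exact absurd (hrhigh r (le_refl _) h) (hnone r h)
      · omega
    rw [this, hlen, if_neg (by omega)]

-- ===== VERDICT =====
theorem get_strings_with_digits_spec : Claim_equal_get_strings_with_digits := by
  intro str_list t _
  show _ = _
  rw [get_strings_with_digits, pvA_char, pvB_char]
  cases pvFind t (pvP str_list 0) <;> simp
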